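-- pv_equiv track=rewrite | github.com/981377660LMT/algorithm-study | tmp/351/3.py | specialPerm
-- ===== SOURCE A (Python) =====
-- from functools import lru_cache
-- from typing import List, Tuple, Optional
--
-- MOD = int(1e9 + 7)
--
-- def specialPerm(nums: List[int]) -> int:
--     @lru_cache(None)
--     def dfs(index: int, pre: int, visited: int) -> int:
--         if index == n:
--             return 1
--         res = 0
--         for next in range(n):
--             if visited & (1 << next) or (
--                 pre != -1 and nums[next] % nums[pre] != 0 and nums[pre] % nums[next] != 0
--             ):
--                 continue
--             res += dfs(index + 1, next, visited | 1 << next)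
--         return res % MOD
--
--     n = len(nums)
--     res = dfs(0, -1, 0)
--     dfs.cache_clear()
--     return res % MOD
-- ===== SOURCE B (Python) =====
-- def specialPerm(nums):
--     MOD = 10 ** 9 + 7
--     n = len(nums)
--     # g[rem][p] = number of valid orderings of the index set `rem`, given the
--     # previously placed index p (p == n means "no previous element").
--     g = [[1] * (n + 1)]
--     for rem in range(1, 1 << n):
--         row = []
--         for p in range(n + 1):
--             if p < n and rem >> p & 1:
--                 row.append(0)  # impossible state: previous element still unused
--                 continue
--             total = 0
--             for nxt in range(n):
--                 if rem >> nxt & 1 and (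
--                     p == n or nums[nxt] % nums[p] == 0 or nums[p] % nums[nxt] == 0
--                 ):
--                     total += g[rem ^ (1 << nxt)][nxt]
--             row.append(total % MOD)
--         g.append(row)
--     return g[(1 << n) - 1][n] % MOD
-- ===== Notes on version B (the rewrite author's own statement) =====
-- stated objective: alternative
-- what changed: Replaced the memoized top-down recursion over (index, pre, visited) by an explicit bottom-up bitmask DP table g[rem][p] filled by three nested loops over masks of remaining elements, previous index and next index.
import Mathlib
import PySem

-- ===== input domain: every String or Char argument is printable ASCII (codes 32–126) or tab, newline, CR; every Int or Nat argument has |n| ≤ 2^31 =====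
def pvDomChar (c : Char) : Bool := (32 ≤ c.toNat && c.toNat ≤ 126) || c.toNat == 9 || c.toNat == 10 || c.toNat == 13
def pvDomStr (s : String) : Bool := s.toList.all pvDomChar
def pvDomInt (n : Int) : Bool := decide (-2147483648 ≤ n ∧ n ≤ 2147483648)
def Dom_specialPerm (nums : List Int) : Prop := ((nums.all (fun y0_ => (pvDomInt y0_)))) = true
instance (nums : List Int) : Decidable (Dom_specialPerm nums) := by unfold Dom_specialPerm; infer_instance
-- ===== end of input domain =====

-- B replaces A's memoized top-down recursion by an explicit bottom-up bitmask DP table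
-- g[rem][p] (rem = set of still-unused indices, p = previous index, p = n meaning "none"),
-- filled by three nested loops over masks; same asymptotic cost, different decomposition.

def pvMOD : Int := 1000000007

-- ===== PORT A =====
-- A's dfs(index, pre, visited); the recursion argument `fuel` is n - index (A only
-- calls dfs with 0 ≤ index ≤ n, so index == n exactly when fuel = 0).  `pre` is the
-- Python int (-1 or an index), `visited` the Python bitmask.  nums[next] is in range
-- (next < n = len(nums)), so List.getD is exact; % is PySem.Int.mod (divisor ≠ 0 under Pre_).
def dfsA (nums : List Int) (n : Nat) : Nat → Int → Nat → Int
  | 0, _, _ => 1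
  | fuel+1, pre, visited =>
    PySem.Int.mod
      ((List.range n).foldl (fun res next =>
        if visited.testBit next ∨ (pre ≠ -1 ∧
            PySem.Int.mod (nums.getD next 0) (nums.getD pre.toNat 0) ≠ 0 ∧
            PySem.Int.mod (nums.getD pre.toNat 0) (nums.getD next 0) ≠ 0)
        then res
        else res + dfsA nums n fuel (next : Int) (visited ||| (1 <<< next))) 0)
      pvMOD

def specialPerm (nums : List Int) : Int :=
  let n := nums.length
  PySem.Int.mod (dfsA nums n n (-1) 0) pvMOD

-- ===== PORT B =====
-- one row of the DP table: row[p] for p in range(n+1) (Source B's inner two loops);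
-- `rem >> j & 1` is Nat.testBit, `1 << j` is 1 <<< j.
def rowB (nums : List Int) (n : Nat) (g : List (List Int)) (rem : Nat) : List Int :=
  (List.range (n+1)).foldl (fun row p =>
    if p < n ∧ rem.testBit p then row ++ [(0 : Int)]
    else
      row ++ [PySem.Int.mod
        ((List.range n).foldl (fun total nxt =>
          if rem.testBit nxt ∧ (p = n ∨
              PySem.Int.mod (nums.getD nxt 0) (nums.getD p 0) = 0 ∨
              PySem.Int.mod (nums.getD p 0) (nums.getD nxt 0) = 0)
          then total + ((g.getD (rem ^^^ (1 <<< nxt)) []).getD nxt 0)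
          else total) 0)
        pvMOD]) []

def specialPerm_alt (nums : List Int) : Int :=
  let n := nums.length
  let g := (List.range' 1 (2^n - 1)).foldl (fun g rem => g ++ [rowB nums n g rem])
             [List.replicate (n+1) (1 : Int)]
  PySem.Int.mod ((g.getD (2^n - 1) []).getD n 0) pvMOD

-- ===== PRECONDITION & SPEC =====
-- Pre_ excludes exactly the inputs on which the Python A raises ZeroDivisionError:
-- a list of length ≥ 2 containing 0 (the recursion then evaluates x % 0).
def Pre_specialPerm (nums : List Int) : Prop := nums.length ≤ 1 ∨ ¬ (0 : Int) ∈ nums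
instance (nums : List Int) : Decidable (Pre_specialPerm nums) := by unfold Pre_specialPerm; infer_instance
def pvWitness_specialPerm : List Int := [2, 1, 4]

def Spec_specialPerm (nums : List Int) (out : Int) : Prop := out = specialPerm_alt nums
instance (nums : List Int) (out : Int) : Decidable (Spec_specialPerm nums out) := by unfold Spec_specialPerm; infer_instance

-- ===== CLAIM (what is proved, stated in full; the proofs are below) =====
def Claim_equal_specialPerm : Prop := ∀ (nums : List Int), Dom_specialPerm nums → Pre_specialPerm nums → Spec_specialPerm nums (specialPerm nums)

-- ===== LEMMAS AND PROOFS =====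

-- number of set bits of m among positions < n
def popc (n m : Nat) : Nat := (List.range n).countP (fun i => m.testBit i)

-- the DP table after processing rem = 1 .. k (definitionally the fold in specialPerm_alt)
def gTab (nums : List Int) (n k : Nat) : List (List Int) :=
  (List.range' 1 k).foldl (fun g rem => g ++ [rowB nums n g rem])
    [List.replicate (n+1) (1 : Int)]

theorem popc_zero (n : Nat) : popc n 0 = 0 := by
  simp [popc]

theorem popc_full (n : Nat) : popc n (2^n - 1) = n := by
  have : (List.range n).countP (fun i => (2^n - 1).testBit i) = (List.range n).length := by
    rw [List.countP_eq_length]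
    intro a ha
    simp only [List.mem_range] at ha
    simp [Nat.testBit_two_pow_sub_one, ha]
  simpa [popc] using this

theorem testBit_high_false {m n j : Nat} (hm : m < 2^n) (hj : n ≤ j) : m.testBit j = false := by
  apply Nat.testBit_lt_two_pow
  exact lt_of_lt_of_le hm (Nat.pow_le_pow_right (by norm_num) hj)

theorem popc_pos {n m : Nat} (hm : m < 2^n) (h0 : m ≠ 0) : 0 < popc n m := by
  rcases Nat.eq_zero_or_pos (popc n m) with h | h
  · exfalso
    apply h0
    apply Nat.eq_of_testBit_eq
    intro i
    by_cases hi : i < n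
    · have := List.countP_eq_zero.mp h i (by simpa using hi)
      simpa using this
    · simp [testBit_high_false hm (le_of_not_gt hi)]
  · exact h

theorem xor_bit_lt {m t : Nat} (h : m.testBit t = true) : m ^^^ (1 <<< t) < m := by
  have h1 : (1 : Nat) <<< t = 2^t := by simp [Nat.shiftLeft_eq]
  rw [h1]
  apply Nat.lt_of_testBit t
  · simp [Nat.testBit_xor, h]
  · exact h
  · intro j hj
    have : (2^t).testBit j = false := by
      simp [Nat.testBit_two_pow]
      omega
    simp [Nat.testBit_xor, this]

theorem testBit_xor_bit {m t i : Nat} :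
    (m ^^^ (1 <<< t)).testBit i = ((m.testBit i).xor (decide (t = i))) := by
  have h1 : (1 : Nat) <<< t = 2^t := by simp [Nat.shiftLeft_eq]
  simp [h1, Nat.testBit_xor, Nat.testBit_two_pow]

theorem popc_xor_bit {n m t : Nat} (ht : t < n) (h : m.testBit t = true) :
    popc n (m ^^^ (1 <<< t)) + 1 = popc n m := by
  have hmem : t ∈ List.range n := by simpa using ht
  have hperm := List.perm_cons_erase hmem
  have hnd := List.nodup_range (n := n)
  have hcongr : ((List.range n).erase t).countP (fun i => (m ^^^ (1 <<< t)).testBit i)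
      = ((List.range n).erase t).countP (fun i => m.testBit i) := by
    apply List.countP_congr
    intro x hx
    have hxne : x ≠ t := ((List.Nodup.mem_erase_iff hnd).mp hx).1
    rw [testBit_xor_bit, decide_eq_false (by omega : ¬ t = x), Bool.xor_false]
  have e1 : popc n (m ^^^ (1 <<< t)) =
      ((List.range n).erase t).countP (fun i => (m ^^^ (1 <<< t)).testBit i) := by
    unfold popc
    rw [hperm.countP_eq, List.countP_cons, testBit_xor_bit, h]
    simp
  have e2 : popc n m = ((List.range n).erase t).countP (fun i => m.testBit i) + 1 := by
    unfold popc
    rw [hperm.countP_eq]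
    simp [h]
  omega

theorem compl_testBit {n m i : Nat} (hi : i < n) :
    ((2^n - 1) ^^^ m).testBit i = !(m.testBit i) := by
  simp [Nat.testBit_xor, Nat.testBit_two_pow_sub_one, hi]

theorem compl_or_bit {n m t : Nat} (ht : t < n) (h : m.testBit t = true) :
    ((2^n - 1) ^^^ m) ||| (1 <<< t) = (2^n - 1) ^^^ (m ^^^ (1 <<< t)) := by
  have h1 : (1 : Nat) <<< t = 2^t := by simp [Nat.shiftLeft_eq]
  apply Nat.eq_of_testBit_eq
  intro i
  by_cases hit : t = i
  · subst hit
    simp [Nat.testBit_or, Nat.testBit_xor, h1,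
      Nat.testBit_two_pow_sub_one, ht, h]
  · simp [Nat.testBit_or, Nat.testBit_xor, h1, hit]

-- rowB is a map over range (n+1): entry p of the row
def entryB (nums : List Int) (n : Nat) (g : List (List Int)) (rem p : Nat) : Int :=
  if p < n ∧ rem.testBit p then 0
  else
    PySem.Int.mod
      ((List.range n).foldl (fun total nxt =>
        if rem.testBit nxt ∧ (p = n ∨
            PySem.Int.mod (nums.getD nxt 0) (nums.getD p 0) = 0 ∨
            PySem.Int.mod (nums.getD p 0) (nums.getD nxt 0) = 0)
        then total + ((g.getD (rem ^^^ (1 <<< nxt)) []).getD nxt 0)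
        else total) 0)
      pvMOD

theorem rowB_eq_map (nums : List Int) (n : Nat) (g : List (List Int)) (rem : Nat) :
    rowB nums n g rem = (List.range (n+1)).map (entryB nums n g rem) := by
  unfold rowB
  have hfe : (fun (row : List Int) p =>
      if p < n ∧ rem.testBit p then row ++ [(0 : Int)]
      else
        row ++ [PySem.Int.mod
          ((List.range n).foldl (fun total nxt =>
            if rem.testBit nxt ∧ (p = n ∨
                PySem.Int.mod (nums.getD nxt 0) (nums.getD p 0) = 0 ∨
                PySem.Int.mod (nums.getD p 0) (nums.getD nxt 0) = 0)
            then total + ((g.getD (rem ^^^ (1 <<< nxt)) []).getD nxt 0)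
            else total) 0)
          pvMOD]) = fun row p => row ++ [entryB nums n g rem p] := by
    funext row p
    unfold entryB
    split <;> rfl
  rw [hfe, PySem.List.foldl_append_singleton_eq_map]
  simp

theorem gTab_zero (nums : List Int) (n : Nat) :
    gTab nums n 0 = [List.replicate (n+1) (1 : Int)] := rfl

theorem gTab_succ (nums : List Int) (n k : Nat) :
    gTab nums n (k+1) = gTab nums n k ++ [rowB nums n (gTab nums n k) (k+1)] := by
  unfold gTab
  rw [List.range'_1_concat, List.foldl_append]
  simp [Nat.add_comm]

-- main invariant: entry (m, p) of the table equals A's dfs on the corresponding state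
theorem gTab_spec (nums : List Int) (n : Nat) : ∀ (k : Nat), k < 2^n →
    (gTab nums n k).length = k + 1 ∧
    ∀ m, m ≤ k → ∀ p, p ≤ n → (p = n ∨ m.testBit p = false) →
      ((gTab nums n k).getD m []).getD p 0
        = dfsA nums n (popc n m) (if p = n then -1 else (p : Int)) ((2^n - 1) ^^^ m) := by
  intro k
  induction k with
  | zero =>
    intro _
    constructor
    · simp [gTab_zero]
    · intro m hm p hp _
      interval_cases m
      rw [gTab_zero]
      simp only [List.getD_cons_zero]
      rw [List.getD_eq_getElem?_getD]
      have hp' : p < n + 1 := by omega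
      simp [hp', popc_zero, dfsA]
  | succ k ih =>
    intro hk
    obtain ⟨hlen, hent⟩ := ih (by omega)
    have hlen' : (gTab nums n (k+1)).length = k + 2 := by
      rw [gTab_succ]; simp [hlen]
    refine ⟨hlen', ?_⟩
    intro m hm p hp hgood
    by_cases hmk : m ≤ k
    · -- old entries unchanged
      rw [gTab_succ, List.getD_append _ _ _ _ (by omega)]
      exact hent m hmk p hp hgood
    · -- the new row, m = k + 1
      have hmeq : m = k + 1 := by omega
      subst hmeq
      rw [gTab_succ]
      rw [List.getD_append_right _ _ _ _ (by omega), hlen]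
      simp only [Nat.sub_self, List.getD_cons_zero]
      rw [rowB_eq_map, List.getD_eq_getElem?_getD]
      have hp' : p < n + 1 := by omega
      simp only [List.getElem?_map, List.getElem?_range hp', Option.map_some,
        Option.getD_some]
      unfold entryB
      have hng : ¬ (p < n ∧ (k+1).testBit p) := by
        rcases hgood with h | h
        · omega
        · intro hc; rw [h] at hc; exact absurd hc.2 (by simp)
      rw [if_neg hng]
      have hpos : 0 < popc n (k+1) := popc_pos hk (by omega)
      obtain ⟨s, hs⟩ : ∃ s, popc n (k+1) = s + 1 := ⟨popc n (k+1) - 1, by omega⟩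
      rw [hs, dfsA]
      congr 1
      apply PySem.List.foldl_congr_mem
      intro acc nxt hnxt
      have hnxtn : nxt < n := by simpa using hnxt
      have hvb : ((2^n - 1) ^^^ (k+1)).testBit nxt = !((k+1).testBit nxt) :=
        compl_testBit hnxtn
      -- the looked-up table entry equals the recursive call, whenever the bit is set
      have hterm : (k+1).testBit nxt = true →
          ((gTab nums n k).getD ((k+1) ^^^ (1 <<< nxt)) []).getD nxt 0
            = dfsA nums n s (nxt : Int) (((2^n - 1) ^^^ (k+1)) ||| (1 <<< nxt)) := by
        intro hb
        have hm' : (k+1) ^^^ (1 <<< nxt) ≤ k := by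
          have := xor_bit_lt hb
          omega
        have hgood' : nxt = n ∨ ((k+1) ^^^ (1 <<< nxt)).testBit nxt = false := by
          right
          rw [testBit_xor_bit, hb]
          simp
        have h := hent ((k+1) ^^^ (1 <<< nxt)) hm' nxt (by omega) hgood'
        have hps : popc n ((k+1) ^^^ (1 <<< nxt)) = s := by
          have := popc_xor_bit hnxtn hb
          omega
        rw [h, hps, if_neg (by omega), compl_or_bit hnxtn hb]
      by_cases hp_n : p = n
      · -- no previous element: A's pre is -1
        rw [if_pos hp_n]
        by_cases hb : (k+1).testBit nxt = true
        · rw [if_pos ⟨hb, Or.inl hp_n⟩, hterm hb, if_neg (by simp [hvb, hb])]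
        · rw [if_neg (by tauto), if_pos (by simp [hvb, hb])]
      · -- previous element p < n
        rw [if_neg hp_n]
        simp only [Int.toNat_natCast]
        by_cases hb : (k+1).testBit nxt = true
        · by_cases hdvd : PySem.Int.mod (nums.getD nxt 0) (nums.getD p 0) = 0 ∨
              PySem.Int.mod (nums.getD p 0) (nums.getD nxt 0) = 0
          · rw [if_pos ⟨hb, Or.inr hdvd⟩, hterm hb,
              if_neg (by rw [hvb, hb]; simp only [Bool.not_true, Bool.false_eq_true, false_or]; tauto)]
          · rw [if_neg (by tauto),
              if_pos (Or.inr ⟨by omega, fun h1 => hdvd (Or.inl h1), fun h2 => hdvd (Or.inr h2)⟩)]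
        · rw [if_neg (by tauto), if_pos (Or.inl (by simp [hvb, hb]))]

-- ===== VERDICT (by name: the statement is the Claim_ definition above) =====
theorem specialPerm_spec : Claim_equal_specialPerm := by
  intro nums _ _
  show specialPerm nums = specialPerm_alt nums
  have hlt : 2^nums.length - 1 < 2^nums.length :=
    Nat.sub_lt (Nat.two_pow_pos _) one_pos
  have h := (gTab_spec nums nums.length (2^nums.length - 1) hlt).2
      (2^nums.length - 1) le_rfl nums.length le_rfl (Or.inl rfl)
  rw [popc_full, Nat.xor_self, if_pos rfl] at h
  show PySem.Int.mod (dfsA nums nums.length nums.length (-1) 0) pvMOD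
      = PySem.Int.mod
          (((gTab nums nums.length (2^nums.length - 1)).getD (2^nums.length - 1) []).getD
            nums.length 0) pvMOD
  rw [h]
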